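-- pv_equiv track=rewrite | github.com/maybleMyers/H1111 | analyze_model_weights.py | _detect_conventions
-- ===== SOURCE A (Python) =====
-- def _detect_conventions(keys: list) -> dict:
--     """Detect naming conventions in keys."""
--     conventions = {
--         'dot_separated': sum(1 for k in keys if '.' in k),
--         'underscore_separated': sum(1 for k in keys if '_' in k),
--         'mixed_separation': sum(1 for k in keys if '.' in k and '_' in k),
--         'camelCase': sum(1 for k in keys if any(c.isupper() for c in k[1:])),
--         'has_numbers': sum(1 for k in keys if any(c.isdigit() for c in k)),
--     }
--     return conventions
-- ===== SOURCE B (Python) =====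
-- def _detect_conventions(keys: list) -> dict:
--     """Detect naming conventions: classify each key into a 4-bit mask, build a
--     16-bucket histogram, then derive the five counts from the histogram."""
--     hist = [0] * 16
--     for k in keys:
--         m = 0
--         if '.' in k:
--             m |= 1
--         if '_' in k:
--             m |= 2
--         if any(c.isupper() for c in k[1:]):
--             m |= 4
--         if any(c.isdigit() for c in k):
--             m |= 8
--         hist[m] += 1
--     dot = under = mixed = camel = nums = 0
--     for m, c in enumerate(hist):
--         if m & 1:
--             dot += c
--         if m & 2:
--             under += c
--         if m & 1 and m & 2:
--             mixed += c
--         if m & 4: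
--             camel += c
--         if m & 8:
--             nums += c
--     return {
--         'dot_separated': dot,
--         'underscore_separated': under,
--         'mixed_separation': mixed,
--         'camelCase': camel,
--         'has_numbers': nums,
--     }
-- ===== Notes on version B (the rewrite author's own statement) =====
-- stated objective: alternative
-- what changed: B classifies each key once into a 4-bit feature mask (dot/underscore/upper-after-first/digit), accumulates a 16-bucket histogram of masks in one pass over the keys, and then derives all five convention counts by a scan of the 16 histogram buckets; A instead scans the whole key list five separate times, one sum-comprehension per count.
import Mathlib
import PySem

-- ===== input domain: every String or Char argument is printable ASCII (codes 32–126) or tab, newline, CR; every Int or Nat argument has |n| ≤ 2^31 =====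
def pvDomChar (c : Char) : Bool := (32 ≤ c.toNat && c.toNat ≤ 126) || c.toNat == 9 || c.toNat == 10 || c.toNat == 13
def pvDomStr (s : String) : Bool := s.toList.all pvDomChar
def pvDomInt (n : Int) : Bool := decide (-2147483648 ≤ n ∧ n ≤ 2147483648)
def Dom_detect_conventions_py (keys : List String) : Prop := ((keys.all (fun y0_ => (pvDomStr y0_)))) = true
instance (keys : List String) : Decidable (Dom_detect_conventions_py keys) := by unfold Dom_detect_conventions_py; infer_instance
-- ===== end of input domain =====

-- B replaces A's five separate scans of the key list by one pass that buckets each key's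
-- 4-bit feature mask into a 16-entry histogram and then derives the five counts from the
-- histogram (objective: alternative algorithm, same asymptotic cost).

-- ===== PORT A =====
-- A: a dict literal whose five values are independent sum-comprehensions over keys.
def detect_conventions_py (keys : List String) : List (String × Int) :=
  [ ("dot_separated", keys.foldl (fun acc k => if '.' ∈ k.toList then acc + 1 else acc) 0),
    ("underscore_separated", keys.foldl (fun acc k => if '_' ∈ k.toList then acc + 1 else acc) 0),
    ("mixed_separation", keys.foldl (fun acc k => if '.' ∈ k.toList ∧ '_' ∈ k.toList then acc + 1 else acc) 0),
    ("camelCase", keys.foldl (fun acc k => if (k.toList.drop 1).any Char.isUpper then acc + 1 else acc) 0),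
    ("has_numbers", keys.foldl (fun acc k => if k.toList.any Char.isDigit then acc + 1 else acc) 0) ]

-- ===== PORT B =====
-- the 4-bit feature mask built by B's four `if … : m |= bit` statements
def pvMask (k : String) : Nat :=
  let m : Nat := 0
  let m := if '.' ∈ k.toList then m ||| 1 else m
  let m := if '_' ∈ k.toList then m ||| 2 else m
  let m := if (k.toList.drop 1).any Char.isUpper then m ||| 4 else m
  let m := if k.toList.any Char.isDigit then m ||| 8 else m
  m

-- B's first loop: `for k in keys: hist[pvMask k] += 1` (mask is always < 16, in range)
def pvBuild : List String → List Int → List Int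
  | [], hist => hist
  | k :: rest, hist =>
      let m := pvMask k
      pvBuild rest (hist.set m (hist.getD m 0 + 1))

-- B's second loop: `for m, c in enumerate(hist): …` bumping the five counters
def pvTally : List Int → Nat → Int × Int × Int × Int × Int → Int × Int × Int × Int × Int
  | [], _, s => s
  | c :: rest, m, (dot, under, mixed, camel, nums) =>
      pvTally rest (m + 1)
        ( if m &&& 1 ≠ 0 then dot + c else dot,
          if m &&& 2 ≠ 0 then under + c else under,
          if m &&& 1 ≠ 0 ∧ m &&& 2 ≠ 0 then mixed + c else mixed,
          if m &&& 4 ≠ 0 then camel + c else camel,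
          if m &&& 8 ≠ 0 then nums + c else nums )

def detect_conventions_py_alt (keys : List String) : List (String × Int) :=
  let hist := pvBuild keys (List.replicate 16 0)
  let s := pvTally hist 0 (0, 0, 0, 0, 0)
  [ ("dot_separated", s.1),
    ("underscore_separated", s.2.1),
    ("mixed_separation", s.2.2.1),
    ("camelCase", s.2.2.2.1),
    ("has_numbers", s.2.2.2.2) ]

-- ===== PRECONDITION & SPEC =====
def Spec_detect_conventions_py (keys : List String) (out : List (String × Int)) : Prop := out = detect_conventions_py_alt keys
instance (keys : List String) (out : List (String × Int)) : Decidable (Spec_detect_conventions_py keys out) := by unfold Spec_detect_conventions_py; infer_instance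

-- ===== CLAIM (what is proved, stated in full; the proofs are below) =====
def Claim_equal_detect_conventions_py : Prop := ∀ (keys : List String), Dom_detect_conventions_py keys → Spec_detect_conventions_py keys (detect_conventions_py keys)

-- ===== LEMMAS AND PROOFS =====

-- "sum of hist[j] over buckets j (starting at index i) with p (i+offset)" — the spec of one tally counter
def pvSumP (p : Nat → Prop) [DecidablePred p] : Nat → List Int → Int
  | _, [] => 0
  | i, c :: rest => (if p i then c else 0) + pvSumP p (i + 1) rest

theorem pvMask_lt (k : String) : pvMask k < 16 := by
  unfold pvMask
  by_cases h1 : '.' ∈ k.toList <;> by_cases h2 : '_' ∈ k.toList <;>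
    by_cases h3 : (k.toList.drop 1).any Char.isUpper = true <;>
    by_cases h4 : k.toList.any Char.isDigit = true <;>
    simp only [h1, h2, h3, h4, if_true, if_false] <;> decide

theorem pvMask_bit1 (k : String) : (pvMask k &&& 1 ≠ 0) ↔ '.' ∈ k.toList := by
  unfold pvMask
  by_cases h1 : '.' ∈ k.toList <;> by_cases h2 : '_' ∈ k.toList <;>
    by_cases h3 : (k.toList.drop 1).any Char.isUpper = true <;>
    by_cases h4 : k.toList.any Char.isDigit = true <;>
    simp only [h1, h2, h3, h4, if_true, if_false] <;> decide

theorem pvMask_bit2 (k : String) : (pvMask k &&& 2 ≠ 0) ↔ '_' ∈ k.toList := by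
  unfold pvMask
  by_cases h1 : '.' ∈ k.toList <;> by_cases h2 : '_' ∈ k.toList <;>
    by_cases h3 : (k.toList.drop 1).any Char.isUpper = true <;>
    by_cases h4 : k.toList.any Char.isDigit = true <;>
    simp only [h1, h2, h3, h4, if_true, if_false] <;> decide

theorem pvMask_bit4 (k : String) : (pvMask k &&& 4 ≠ 0) ↔ (k.toList.drop 1).any Char.isUpper = true := by
  unfold pvMask
  by_cases h1 : '.' ∈ k.toList <;> by_cases h2 : '_' ∈ k.toList <;>
    by_cases h3 : (k.toList.drop 1).any Char.isUpper = true <;>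
    by_cases h4 : k.toList.any Char.isDigit = true <;>
    simp only [h1, h2, h3, h4, if_true, if_false] <;> decide

theorem pvMask_bit8 (k : String) : (pvMask k &&& 8 ≠ 0) ↔ k.toList.any Char.isDigit = true := by
  unfold pvMask
  by_cases h1 : '.' ∈ k.toList <;> by_cases h2 : '_' ∈ k.toList <;>
    by_cases h3 : (k.toList.drop 1).any Char.isUpper = true <;>
    by_cases h4 : k.toList.any Char.isDigit = true <;>
    simp only [h1, h2, h3, h4, if_true, if_false] <;> decide

-- the tally loop computes, in each component, start value + pvSumP of the matching predicate
theorem pvTally_eq (l : List Int) : ∀ (i : Nat) (a b c d e : Int),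
    pvTally l i (a, b, c, d, e) =
      ( a + pvSumP (fun m => m &&& 1 ≠ 0) i l,
        b + pvSumP (fun m => m &&& 2 ≠ 0) i l,
        c + pvSumP (fun m => m &&& 1 ≠ 0 ∧ m &&& 2 ≠ 0) i l,
        d + pvSumP (fun m => m &&& 4 ≠ 0) i l,
        e + pvSumP (fun m => m &&& 8 ≠ 0) i l ) := by
  induction l with
  | nil => intro i a b c d e; simp [pvTally, pvSumP]
  | cons x rest ih =>
      intro i a b c d e
      simp only [pvTally, pvSumP, ih]
      refine Prod.ext ?_ (Prod.ext ?_ (Prod.ext ?_ (Prod.ext ?_ ?_))) <;>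
        simp <;> split_ifs <;> ring

-- bumping one in-range bucket adds (if p (i+j) then 1 else 0) to the p-sum
theorem pvSumP_set (p : Nat → Prop) [DecidablePred p] (l : List Int) : ∀ (i j : Nat), j < l.length →
    pvSumP p i (l.set j (l.getD j 0 + 1)) = pvSumP p i l + (if p (i + j) then 1 else 0) := by
  induction l with
  | nil => intro i j h; simp at h
  | cons c rest ih =>
      intro i j h
      cases j with
      | zero => simp [pvSumP]; split_ifs <;> ring
      | succ j =>
          simp only [List.set_cons_succ, List.getD_cons_succ, pvSumP]
          rw [ih (i + 1) j (by simpa using h)]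
          have : i + 1 + j = i + (j + 1) := by omega
          rw [this]; ring

-- the histogram pass, summed through predicate p, equals A's direct count of keys with p ∘ pvMask
theorem pvBuild_sum (p : Nat → Prop) [DecidablePred p] (keys : List String) :
    ∀ hist : List Int, hist.length = 16 →
    pvSumP p 0 (pvBuild keys hist) =
      keys.foldl (fun acc k => if p (pvMask k) then acc + 1 else acc) (pvSumP p 0 hist) := by
  induction keys with
  | nil => intro hist _; simp [pvBuild]
  | cons k rest ih =>
      intro hist hlen
      simp only [pvBuild, List.foldl_cons]
      rw [ih _ (by simp [hlen])]
      rw [pvSumP_set p hist 0 (pvMask k) (by rw [hlen]; exact pvMask_lt k)]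
      simp only [Nat.zero_add]
      congr 1
      split_ifs <;> ring

theorem pvSumP_replicate_zero (p : Nat → Prop) [DecidablePred p] : ∀ (n i : Nat),
    pvSumP p i (List.replicate n 0) = 0 := by
  intro n
  induction n with
  | zero => intro i; simp [pvSumP]
  | succ n ih => intro i; simp [List.replicate_succ, pvSumP, ih]

-- ===== VERDICT (by name: the statement is the Claim_ definition above) =====
theorem detect_conventions_py_spec : Claim_equal_detect_conventions_py := by
  intro keys _
  unfold Spec_detect_conventions_py detect_conventions_py detect_conventions_py_alt
  have hb : ∀ (p : Nat → Prop) [DecidablePred p],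
      pvSumP p 0 (pvBuild keys (List.replicate 16 0)) =
        keys.foldl (fun acc k => if p (pvMask k) then acc + 1 else acc) 0 := by
    intro p _
    rw [pvBuild_sum p keys _ (by simp), pvSumP_replicate_zero]
  have e1 : (fun (acc : Int) k => if pvMask k &&& 1 ≠ 0 then acc + 1 else acc) =
      (fun (acc : Int) k => if '.' ∈ k.toList then acc + 1 else acc) := by
    funext acc k; rw [if_congr (pvMask_bit1 k) rfl rfl]
  have e2 : (fun (acc : Int) k => if pvMask k &&& 2 ≠ 0 then acc + 1 else acc) =
      (fun (acc : Int) k => if '_' ∈ k.toList then acc + 1 else acc) := by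
    funext acc k; rw [if_congr (pvMask_bit2 k) rfl rfl]
  have e3 : (fun (acc : Int) k => if pvMask k &&& 1 ≠ 0 ∧ pvMask k &&& 2 ≠ 0 then acc + 1 else acc) =
      (fun (acc : Int) k => if '.' ∈ k.toList ∧ '_' ∈ k.toList then acc + 1 else acc) := by
    funext acc k; rw [if_congr (and_congr (pvMask_bit1 k) (pvMask_bit2 k)) rfl rfl]
  have e4 : (fun (acc : Int) k => if pvMask k &&& 4 ≠ 0 then acc + 1 else acc) =
      (fun (acc : Int) k => if (k.toList.drop 1).any Char.isUpper = true then acc + 1 else acc) := by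
    funext acc k; rw [if_congr (pvMask_bit4 k) rfl rfl]
  have e5 : (fun (acc : Int) k => if pvMask k &&& 8 ≠ 0 then acc + 1 else acc) =
      (fun (acc : Int) k => if k.toList.any Char.isDigit = true then acc + 1 else acc) := by
    funext acc k; rw [if_congr (pvMask_bit8 k) rfl rfl]
  simp only [pvTally_eq, hb, zero_add]
  rw [e1, e2, e3, e4, e5]
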